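-- pv_equiv track=rewrite | github.com/rolansy/Xtreme | stick.py | calculate_union_area
-- ===== SOURCE A (Python) =====
-- def calculate_union_area(N, K, L):
--     if K >= 2 * L:
--         # Non-overlapping case
--         return N * (2 * L) ** 2
--
--     # Overlapping case
--     intervals = []
--     for i in range(N):
--         center = i * K
--         left = center - L
--         right = center + L
--         intervals.append((left, right))
--
--     # Merge intervals
--     intervals.sort()
--     merged_intervals = []
--     current_start, current_end = intervals[0]
--
--     for start, end in intervals[1:]:
--         if start <= current_end:
--             current_end = max(current_end, end)
--         else:
--             merged_intervals.append((current_start, current_end))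
--             current_start, current_end = start, end
--
--     merged_intervals.append((current_start, current_end))
--
--     # Calculate the total area
--     total_area = 0
--     for start, end in merged_intervals:
--         total_area += (end - start) * (2 * L)
--
--     return total_area
-- ===== SOURCE B (Python) =====
-- def calculate_union_area(N, K, L):
--     # Closed form: when -2L <= K < 2L every interval overlaps (or touches) its
--     # neighbour, so they merge into one block of span (N-1)*|K| + 2L;
--     # otherwise the N intervals are disjoint.
--     if -2 * L <= K < 2 * L:
--         return ((N - 1) * abs(K) + 2 * L) * (2 * L)
--     return N * (2 * L) ** 2
-- ===== Notes on version B (the rewrite author's own statement) =====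
-- stated objective: faster
-- what changed: Replaced the build-sort-merge-sum interval sweep by an O(1) closed form: when -2L <= K < 2L the N equal intervals merge into a single block of span (N-1)*|K|+2L, otherwise they are disjoint, so the area is a direct formula.
import Mathlib
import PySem

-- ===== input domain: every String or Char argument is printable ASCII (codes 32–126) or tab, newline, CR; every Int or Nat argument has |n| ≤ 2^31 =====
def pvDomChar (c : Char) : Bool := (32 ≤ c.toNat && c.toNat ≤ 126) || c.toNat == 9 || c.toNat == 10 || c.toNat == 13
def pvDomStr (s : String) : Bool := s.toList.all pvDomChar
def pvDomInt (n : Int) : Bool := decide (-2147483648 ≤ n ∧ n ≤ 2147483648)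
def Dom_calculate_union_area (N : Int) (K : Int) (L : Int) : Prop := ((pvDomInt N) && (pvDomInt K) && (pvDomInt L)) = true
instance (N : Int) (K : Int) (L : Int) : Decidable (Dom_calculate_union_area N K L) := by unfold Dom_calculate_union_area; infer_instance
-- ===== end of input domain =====

-- B replaces A's build-sort-merge-sum interval sweep by a closed-form area formula (faster).


-- ===== PORT A =====
-- the body of A's merge loop, verbatim: state = (merged_intervals, current_start, current_end)
def pvMergeStep (st : List (Int × Int) × Int × Int) (p : Int × Int) : List (Int × Int) × Int × Int :=
  if p.1 ≤ st.2.2 then (st.1, st.2.1, max st.2.2 p.2)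
  else (st.1 ++ [(st.2.1, st.2.2)], p.1, p.2)

def calculate_union_area (N : Int) (K : Int) (L : Int) : Int :=
  if K ≥ 2 * L then N * (2 * L) ^ 2
  else
    let intervals := (PySem.List.pyRange 0 N 1).map (fun i => (i * K - L, i * K + L))
    let intervals := PySem.List.sorted2 intervals Prod.fst Prod.snd
    match intervals with
    | [] => 0   -- Python raises IndexError on intervals[0] here; excluded by Pre_
    | (cs0, ce0) :: rest =>
      let st := rest.foldl pvMergeStep ([], cs0, ce0)
      let merged := st.1 ++ [(st.2.1, st.2.2)]
      merged.foldl (fun t p => t + (p.2 - p.1) * (2 * L)) 0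

-- ===== PORT B =====
def calculate_union_area_alt (N : Int) (K : Int) (L : Int) : Int :=
  if -(2 * L) ≤ K ∧ K < 2 * L then ((N - 1) * |K| + 2 * L) * (2 * L)
  else N * (2 * L) ^ 2

-- ===== PRECONDITION & SPEC =====
-- Pre_ excludes exactly the inputs (N ≤ 0 with K < 2L) on which A raises IndexError at intervals[0].
def Pre_calculate_union_area (N : Int) (K : Int) (L : Int) : Prop := 2 * L ≤ K ∨ 1 ≤ N
instance (N : Int) (K : Int) (L : Int) : Decidable (Pre_calculate_union_area N K L) := by
  unfold Pre_calculate_union_area; infer_instance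

def pvWitness_calculate_union_area : Int × Int × Int := (3, 1, 2)

def Spec_calculate_union_area (N : Int) (K : Int) (L : Int) (out : Int) : Prop := out = calculate_union_area_alt N K L
instance (N : Int) (K : Int) (L : Int) (out : Int) : Decidable (Spec_calculate_union_area N K L out) := by unfold Spec_calculate_union_area; infer_instance

-- ===== CLAIM (what is proved, stated in full; the proofs are below) =====
def Claim_equal_calculate_union_area : Prop := ∀ (N : Int) (K : Int) (L : Int), Dom_calculate_union_area N K L → Pre_calculate_union_area N K L → Spec_calculate_union_area N K L (calculate_union_area N K L)

-- ===== LEMMAS AND PROOFS =====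

-- insertion-sort folds: an already-before-ordered list is kept, a reverse-ordered list is reversed
theorem pv_insertBy_all_before {α : Type} (before : α → α → Bool) (x : α) (l : List α)
    (h : ∀ y ∈ l, before x y = true) : PySem.List.insertBy before x l = x :: l := by
  cases l with
  | nil => simp [PySem.List.insertBy]
  | cons z zs => rw [PySem.List.insertBy.eq_2, h z (by simp)]; simp

theorem pv_foldl_insertBy_id {α : Type} (before : α → α → Bool) (xs : List α)
    (h : xs.Pairwise (fun a b => before b a = false)) :
    xs.foldl (fun acc x => PySem.List.insertBy before x acc) [] = xs := by
  induction xs using List.reverseRecOn with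
  | nil => rfl
  | append_singleton ys x ih =>
    rw [List.foldl_append, List.foldl_cons, List.foldl_nil,
      ih (h.sublist (List.sublist_append_left ys [x]))]
    exact PySem.List.insertBy_of_forall_not_before before x ys
      (fun y hy => (List.pairwise_append.mp h).2.2 y hy x (by simp))

theorem pv_foldl_insertBy_rev {α : Type} (before : α → α → Bool) (xs : List α)
    (h : xs.Pairwise (fun a b => before b a = true)) :
    xs.foldl (fun acc x => PySem.List.insertBy before x acc) [] = xs.reverse := by
  induction xs using List.reverseRecOn with
  | nil => rfl
  | append_singleton ys x ih =>
    rw [List.foldl_append, List.foldl_cons, List.foldl_nil,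
      ih (h.sublist (List.sublist_append_left ys [x])), List.reverse_append]
    exact pv_insertBy_all_before before x ys.reverse
      (fun y hy => (List.pairwise_append.mp h).2.2 y (by simpa using hy) x (by simp))

-- merge loop, overlapping case: the running interval just extends
theorem pv_merge_overlap (M L : Int) (h0 : 0 ≤ M) (h2 : M ≤ 2 * L) (m : ℕ) :
    ∀ (acc : List (Int × Int)) (cs c : Int),
      ((List.range m).map (fun (j : ℕ) => (c + ((j : Int) + 1) * M - L, c + ((j : Int) + 1) * M + L))).foldl
        pvMergeStep (acc, cs, c + L) = (acc, cs, c + (m : Int) * M + L) := by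
  induction m with
  | zero => intro acc cs c; simp
  | succ m ih =>
    intro acc cs c
    rw [List.range_succ, List.map_append, List.foldl_append, ih]
    have hle : c + ((m : Int) + 1) * M - L ≤ c + (m : Int) * M + L := by nlinarith
    have hmax : max (c + (m : Int) * M + L) (c + ((m : Int) + 1) * M + L)
        = c + ((m : Int) + 1) * M + L := by
      apply max_eq_right; nlinarith
    simp only [List.map_cons, List.map_nil, List.foldl_cons, List.foldl_nil, pvMergeStep,
      if_pos hle, hmax]
    push_cast; ring_nf

-- merge loop, disjoint case: every interval is flushed to the accumulator
theorem pv_merge_disjoint (M L : Int) (h2 : 2 * L < M) (m : ℕ) :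
    ∀ (acc : List (Int × Int)) (c : Int),
      ((List.range m).map (fun (j : ℕ) => (c + ((j : Int) + 1) * M - L, c + ((j : Int) + 1) * M + L))).foldl
        pvMergeStep (acc, c - L, c + L)
      = (acc ++ (List.range m).map (fun (j : ℕ) => (c + (j : Int) * M - L, c + (j : Int) * M + L)),
         c + (m : Int) * M - L, c + (m : Int) * M + L) := by
  induction m with
  | zero => intro acc c; simp
  | succ m ih =>
    intro acc c
    rw [List.range_succ, List.map_append, List.foldl_append, ih]
    have hgt : ¬ (c + ((m : Int) + 1) * M - L ≤ c + (m : Int) * M + L) := by nlinarith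
    simp only [List.map_cons, List.map_nil, List.foldl_cons, List.foldl_nil, pvMergeStep,
      if_neg hgt, List.map_append, List.append_assoc]
    refine Prod.ext ?_ (Prod.ext ?_ ?_) <;> simp

-- total area of m disjoint width-2L intervals
theorem pv_sum_disjoint (M L : Int) (m : ℕ) (c : Int) :
    ∀ (t : Int),
      ((List.range m).map (fun (j : ℕ) => (c + (j : Int) * M - L, c + (j : Int) * M + L))).foldl
        (fun t p => t + (p.2 - p.1) * (2 * L)) t = t + (m : Int) * ((2 * L) * (2 * L)) := by
  induction m with
  | zero => intro t; simp
  | succ m ih =>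
    intro t
    rw [List.range_succ, List.map_append, List.foldl_append, ih]
    simp only [List.map_cons, List.map_nil, List.foldl_cons, List.foldl_nil]
    push_cast; ring

-- ===== VERDICT (by name: the statement is the Claim_ definition above) =====
-- already-sorted / reverse-sorted characterisation of A's tuple sort
theorem pv_pairwise_nonneg (N K L : Int) (hK0 : 0 ≤ K) :
    ((PySem.List.pyRange 0 N 1).map (fun i => (i * K - L, i * K + L))).Pairwise
      (fun a b => (fun a b : Int × Int => decide (a.1 < b.1) || (!decide (b.1 < a.1) && decide (a.2 < b.2))) b a = false) := by
  refine List.Pairwise.map _ (fun i j hij => ?_) (PySem.List.pairwise_lt_pyRange_one 0 N)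
  simp only [Bool.or_eq_false_iff, Bool.and_eq_false_iff, decide_eq_false_iff_not, not_lt,
    Bool.not_eq_false', decide_eq_true_eq]
  exact ⟨by nlinarith, Or.inr (by nlinarith)⟩

theorem pv_pairwise_neg (N K L : Int) (hK0 : K < 0) :
    ((PySem.List.pyRange 0 N 1).map (fun i => (i * K - L, i * K + L))).Pairwise
      (fun a b => (fun a b : Int × Int => decide (a.1 < b.1) || (!decide (b.1 < a.1) && decide (a.2 < b.2))) b a = true) := by
  refine List.Pairwise.map _ (fun i j hij => ?_) (PySem.List.pairwise_lt_pyRange_one 0 N)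
  simp only [Bool.or_eq_true, decide_eq_true_eq]
  exact Or.inl (by nlinarith)

-- A on its merge branch with K ≥ 0: one merged interval
theorem pv_A_nonneg (N K L : Int) (hK : ¬ K ≥ 2*L) (n : ℕ) (hn : N = (n:Int)+1) (hK0 : 0 ≤ K) :
    calculate_union_area N K L = (((n:Int)) * K + 2*L) * (2*L) := by
  unfold calculate_union_area
  rw [if_neg hK]
  have hs2 : PySem.List.sorted2 ((PySem.List.pyRange 0 N 1).map (fun i => (i * K - L, i * K + L))) Prod.fst Prod.snd
      = (PySem.List.pyRange 0 N 1).map (fun i => (i * K - L, i * K + L)) :=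
    pv_foldl_insertBy_id _ _ (pv_pairwise_nonneg N K L hK0)
  have hr : PySem.List.pyRange 0 N 1 = (List.range (n+1)).map (fun k : ℕ => ((k:Int))) := by
    rw [PySem.List.pyRange_one]
    have h1 : (N - 0).toNat = n+1 := by omega
    rw [h1]; simp
  simp only [hs2]
  simp only [hr, List.map_map, List.range_succ_eq_map, List.map_cons, List.map_map]
  have hmapeq : (List.range n).map ((fun i => (i*K - L, i*K + L)) ∘ (fun k : ℕ => ((k:Int))) ∘ Nat.succ)
      = (List.range n).map (fun (j : ℕ) => ((0:Int) + ((j:Int)+1)*K - L, (0:Int) + ((j:Int)+1)*K + L)) := by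
    apply List.map_congr_left; intro j hj
    simp only [Function.comp_apply, Prod.mk.injEq]
    push_cast
    constructor <;> ring
  have h3 : ((0:ℕ):Int) * K + L = (0:Int) + L := by push_cast; ring
  rw [hmapeq, h3, pv_merge_overlap K L hK0 (by omega) n]
  simp only [List.nil_append, List.foldl_cons, List.foldl_nil]
  push_cast
  ring

-- A on its merge branch with K < 0: the sort reverses the list
theorem pv_A_neg_sorted (N K L : Int) (n : ℕ) (hn : N = (n:Int)+1) (hKneg : K < 0) :
    PySem.List.sorted2 ((PySem.List.pyRange 0 N 1).map (fun i => (i * K - L, i * K + L))) Prod.fst Prod.snd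
      = ((n:Int) * K - L, (n:Int) * K + L) ::
        (List.range n).map (fun (j : ℕ) => ((n:Int) * K + ((j:Int)+1) * (-K) - L, (n:Int) * K + ((j:Int)+1) * (-K) + L)) := by
  have hs2 : PySem.List.sorted2 ((PySem.List.pyRange 0 N 1).map (fun i => (i * K - L, i * K + L))) Prod.fst Prod.snd
      = ((PySem.List.pyRange 0 N 1).map (fun i => (i * K - L, i * K + L))).reverse :=
    pv_foldl_insertBy_rev _ _ (pv_pairwise_neg N K L hKneg)
  have hr : PySem.List.pyRange 0 N 1 = (List.range (n+1)).map (fun k : ℕ => ((k:Int))) := by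
    rw [PySem.List.pyRange_one]
    have h1 : (N - 0).toNat = n+1 := by omega
    rw [h1]; simp
  have hrev : (List.range (n+1)).reverse = (List.range (n+1)).map (fun j => n - j) := by
    rw [List.range_eq_range', List.reverse_range', ← List.range_eq_range']
    apply List.map_congr_left; intro j hj; omega
  rw [hs2, hr, List.map_map, ← List.map_reverse, hrev, List.map_map,
    List.range_succ_eq_map, List.map_cons, List.map_map]
  have hhead : (((fun i => (i * K - L, i * K + L)) ∘ (fun k : ℕ => ((k:Int)))) ∘ (fun j => n - j)) 0
      = ((n:Int) * K - L, (n:Int) * K + L) := by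
    simp [Function.comp]
  rw [hhead]
  congr 1
  apply List.map_congr_left; intro j hj
  simp only [List.mem_range] at hj
  have hc : (((n - (j+1) : ℕ)) : Int) = (n:Int) - (j:Int) - 1 := by omega
  simp only [Function.comp_apply, Nat.succ_eq_add_one, hc, Prod.mk.injEq]
  constructor <;> ring

theorem pv_A_neg_overlap (N K L : Int) (hK : ¬ K ≥ 2*L) (n : ℕ) (hn : N = (n:Int)+1)
    (hKneg : K < 0) (h2 : -K ≤ 2*L) :
    calculate_union_area N K L = (((n:Int)) * (-K) + 2*L) * (2*L) := by
  unfold calculate_union_area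
  rw [if_neg hK]
  simp only [pv_A_neg_sorted N K L n hn hKneg]
  rw [pv_merge_overlap (-K) L (by omega) h2 n]
  simp only [List.nil_append, List.foldl_cons, List.foldl_nil]
  ring

theorem pv_A_neg_disjoint (N K L : Int) (hK : ¬ K ≥ 2*L) (n : ℕ) (hn : N = (n:Int)+1)
    (hKneg : K < 0) (h2 : 2*L < -K) :
    calculate_union_area N K L = N * (2*L)^2 := by
  unfold calculate_union_area
  rw [if_neg hK]
  simp only [pv_A_neg_sorted N K L n hn hKneg]
  have hinit : (([] : List (Int × Int)), (n:Int) * K - L, (n:Int) * K + L)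
      = (([] : List (Int × Int)), ((n:Int) * K) - L, ((n:Int) * K) + L) := rfl
  rw [hinit, pv_merge_disjoint (-K) L h2 n]
  rw [List.nil_append, List.foldl_append, pv_sum_disjoint (-K) L n ((n:Int)*K) 0]
  simp only [List.foldl_cons, List.foldl_nil]
  rw [hn]; ring

theorem calculate_union_area_spec : Claim_equal_calculate_union_area := by
  intro N K L hdom hpre
  unfold Spec_calculate_union_area calculate_union_area_alt
  by_cases hK : K ≥ 2*L
  · rw [if_neg (by omega)]
    unfold calculate_union_area
    rw [if_pos hK]
  · have hN : 1 ≤ N := by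
      unfold Pre_calculate_union_area at hpre; omega
    obtain ⟨n, hn⟩ : ∃ m : ℕ, N = (m:Int)+1 := ⟨(N-1).toNat, by omega⟩
    by_cases hK0 : 0 ≤ K
    · rw [if_pos (by constructor <;> omega)]
      rw [pv_A_nonneg N K L hK n hn hK0, abs_of_nonneg hK0, hn]
      ring
    · replace hK0 : K < 0 := by omega
      by_cases h2 : -K ≤ 2*L
      · rw [if_pos (by constructor <;> omega)]
        rw [pv_A_neg_overlap N K L hK n hn hK0 h2, abs_of_neg hK0, hn]
        ring
      · rw [if_neg (by omega)]
        exact pv_A_neg_disjoint N K L hK n hn hK0 (by omega)
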